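-- pv_equiv track=rewrite | github.com/Slipfaith/DM | formula_updater.py | _build_row_map
-- ===== SOURCE A (Python) =====
-- from typing import List, Tuple
--
-- def _build_row_map(old: List[Tuple], new: List[Tuple]) -> dict:
--     """Map old row numbers to new based on row content."""
--     mapping = {}
--     value_to_rows = {}
--     for idx, row in enumerate(new):
--         value_to_rows.setdefault(row, []).append(idx + 1)
--
--     used = set()
--     for idx, row in enumerate(old):
--         options = value_to_rows.get(row, [])
--         new_index = next((i for i in options if i not in used), None)
--         if new_index:
--             mapping[idx + 1] = new_index
--             used.add(new_index)
--     return mapping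
-- ===== SOURCE B (Python) =====
-- from typing import List, Tuple
--
-- def _build_row_map(old: List[Tuple], new: List[Tuple]) -> dict:
--     """Map old row numbers to new based on row content."""
--     new_pos = {}
--     for i, row in enumerate(new):
--         new_pos.setdefault(row, []).append(i + 1)
--     old_pos = {}
--     for i, row in enumerate(old):
--         old_pos.setdefault(row, []).append(i + 1)
--     pairs = []
--     for row, olds in old_pos.items():
--         pairs.extend(zip(olds, new_pos.get(row, [])))
--     pairs.sort(key=lambda p: p[0])
--     return dict(pairs)
-- ===== Notes on version B (the rewrite author's own statement) =====
-- stated objective: alternative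
-- what changed: Instead of scanning each value's full index list against a growing global 'used' set per old row, B groups BOTH sides by row value, zips each value's old-index list with its new-index list (the k-th occurrence on each side pair up), sorts the pairs by old index and builds the dict; the per-row rescan and the 'used' set disappear.
import Mathlib
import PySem

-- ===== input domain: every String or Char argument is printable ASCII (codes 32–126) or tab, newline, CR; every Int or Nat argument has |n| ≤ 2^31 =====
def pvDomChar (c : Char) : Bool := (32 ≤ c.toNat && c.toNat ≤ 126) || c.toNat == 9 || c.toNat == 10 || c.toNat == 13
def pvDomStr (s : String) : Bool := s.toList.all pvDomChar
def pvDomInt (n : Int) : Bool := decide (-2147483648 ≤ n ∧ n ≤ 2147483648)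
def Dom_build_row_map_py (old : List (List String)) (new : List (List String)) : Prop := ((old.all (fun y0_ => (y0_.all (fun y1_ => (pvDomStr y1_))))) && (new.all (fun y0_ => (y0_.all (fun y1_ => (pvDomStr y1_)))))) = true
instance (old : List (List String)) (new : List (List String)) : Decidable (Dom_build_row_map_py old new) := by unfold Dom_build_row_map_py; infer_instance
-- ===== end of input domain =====

-- B replaces A's scan-with-a-global-'used'-set by group-both-sides-by-value, zip each
-- value's old and new index lists, sort the pairs by old index (objective: alternative).

-- ===== PORT A =====
-- literal port of _build_row_map: value_to_rows via setdefault/append, then for each old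
-- row take the first option not in 'used' ('if new_index:' kept as the ≠ 0 truthiness test)
def build_row_map_py (old : List (List String)) (new : List (List String)) : List (Int × Int) :=
  let value_to_rows : PySem.Dict (List String) (List Int) :=
    (PySem.List.enumerate new 0).foldl
      (fun d p => d.modify p.2 [] (· ++ [p.1 + 1])) PySem.Dict.empty
  let st :=
    (PySem.List.enumerate old 0).foldl
      (fun (st : PySem.Dict Int Int × PySem.Set Int) p =>
        let options := value_to_rows.getD p.2 []
        match options.find? (fun i => !(PySem.Set.contains st.2 i)) with
        | some i => if i ≠ 0 then (st.1.insert (p.1 + 1) i, PySem.Set.add st.2 i) else st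
        | none => st)
      (PySem.Dict.empty, PySem.Set.empty)
  st.1.items

-- ===== PORT B =====
-- literal port of Source B: group new and old indices by row value, zip the per-value lists,
-- sort the pairs by old index, build the dict
def build_row_map_py_alt (old : List (List String)) (new : List (List String)) : List (Int × Int) :=
  let new_pos : PySem.Dict (List String) (List Int) :=
    (PySem.List.enumerate new 0).foldl
      (fun d p => d.modify p.2 [] (· ++ [p.1 + 1])) PySem.Dict.empty
  let old_pos : PySem.Dict (List String) (List Int) :=
    (PySem.List.enumerate old 0).foldl
      (fun d p => d.modify p.2 [] (· ++ [p.1 + 1])) PySem.Dict.empty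
  let pairs : List (Int × Int) :=
    old_pos.items.foldl (fun acc q => acc ++ q.2.zip (new_pos.getD q.1 [])) []
  let sortedPairs := PySem.List.sorted pairs (fun p => p.1) false
  (sortedPairs.foldl (fun (d : PySem.Dict Int Int) p => d.insert p.1 p.2) PySem.Dict.empty).items

-- ===== PRECONDITION & SPEC =====
def Spec_build_row_map_py (old : List (List String)) (new : List (List String)) (out : List (Int × Int)) : Prop := out = build_row_map_py_alt old new
instance (old : List (List String)) (new : List (List String)) (out : List (Int × Int)) : Decidable (Spec_build_row_map_py old new out) := by unfold Spec_build_row_map_py; infer_instance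

-- ===== CLAIM (what is proved, stated in full; the proofs are below) =====
def Claim_equal_build_row_map_py : Prop := ∀ (old : List (List String)) (new : List (List String)), Dom_build_row_map_py old new → Spec_build_row_map_py old new (build_row_map_py old new)

-- ===== LEMMAS AND PROOFS =====

-- 1-based positions (offset s) of the rows equal to k
def pvOcc (xs : List (List String)) (s : Int) (k : List String) : List Int :=
  ((PySem.List.enumerate xs s).filter (fun p => p.2 == k)).map (fun p => p.1 + 1)

theorem pvOcc_nil (s : Int) (k : List String) : pvOcc [] s k = [] := by
  simp [pvOcc, PySem.List.enumerate_nil]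

theorem pvOcc_cons (x : List String) (xs : List (List String)) (s : Int) (k : List String) :
    pvOcc (x :: xs) s k = (if x = k then [s + 1] else []) ++ pvOcc xs (s + 1) k := by
  by_cases h : x = k <;>
    simp [pvOcc, PySem.List.enumerate_cons, h]

theorem pvOcc_spec (xs : List (List String)) (s : Int) (k : List String) (x : Int) :
    x ∈ pvOcc xs s k → ∃ (j : Nat) (hj : j < xs.length), xs[j] = k ∧ x = s + j + 1 := by
  intro hx
  simp only [pvOcc, List.mem_map, List.mem_filter] at hx
  obtain ⟨p, ⟨hp, hk⟩, rfl⟩ := hx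
  rw [PySem.List.mem_enumerate_iff] at hp
  obtain ⟨j, hj, rfl⟩ := hp
  exact ⟨j, hj, by simpa using hk, rfl⟩

theorem pvOcc_pairwise (xs : List (List String)) (s : Int) (k : List String) :
    (pvOcc xs s k).Pairwise (· < ·) := by
  have h1 : (PySem.List.enumerate xs s).Pairwise (fun p q => p.1 < q.1) :=
    PySem.List.pairwise_lt_enumerate xs s
  have h2 := List.Pairwise.filter (R := fun (p q : Int × List String) => p.1 < q.1)
    (fun p => p.2 == k) h1
  exact List.Pairwise.map _ (fun a b h => by omega) h2

theorem pvOcc_nodup (xs : List (List String)) (s : Int) (k : List String) :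
    (pvOcc xs s k).Nodup :=
  (pvOcc_pairwise xs s k).imp (fun {a b} (h : a < b) => Int.ne_of_lt h)

theorem pvOcc_inj (xs : List (List String)) (k k' : List String) (a : Int)
    (h1 : a ∈ pvOcc xs 0 k) (h2 : a ∈ pvOcc xs 0 k') : k = k' := by
  obtain ⟨j, hj, hv, he⟩ := pvOcc_spec xs 0 k a h1
  obtain ⟨j', hj', hv', he'⟩ := pvOcc_spec xs 0 k' a h2
  have : j = j' := by omega
  subst this
  exact hv.symm.trans hv'

-- the group-by-value fold computes pvOcc
theorem pvGroup_getD (xs : List (List String)) (k : List String) :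
    (((PySem.List.enumerate xs 0).foldl
      (fun d p => d.modify p.2 [] (· ++ [p.1 + 1])) PySem.Dict.empty).getD k []) = pvOcc xs 0 k := by
  rw [← List.foldl_map (f := fun (p : Int × List String) => (p.2, p.1 + 1))
        (g := fun (d : PySem.Dict (List String) (List Int)) q => d.modify q.1 [] (· ++ [q.2]))]
  rw [PySem.Dict.getD_foldl_modify_append]
  simp [pvOcc, PySem.Dict.getD_empty, List.filter_map, Function.comp_def]

theorem filter_tail_of_head {l : List Int} (p : Int → Bool) (h : Int) (t : List Int)
    (hnd : l.Nodup) (hf : l.filter p = h :: t) :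
    l.filter (fun x => p x && !(x == h)) = t := by
  induction l with
  | nil => simp at hf
  | cons a l ih =>
    rcases List.nodup_cons.mp hnd with ⟨ha, hnd'⟩
    by_cases hpa : p a = true
    · rw [List.filter_cons_of_pos hpa] at hf
      obtain ⟨rfl, hft⟩ : a = h ∧ l.filter p = t := by simpa using hf
      simp only [List.filter_cons, hpa, BEq.rfl, Bool.not_true, Bool.and_false]
      rw [← hft]
      apply List.filter_congr
      intro x hx
      have : x ≠ a := fun e => ha (e ▸ hx)
      simp [this]
    · rw [List.filter_cons_of_neg hpa] at hf
      rw [List.filter_cons_of_neg (by simp [hpa]), ih hnd' hf]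

-- canonical result: walk old left to right, the r-th occurrence of a value gets that
-- value's r-th new position (if any)
def pvF (new : List (List String)) : List (List String) → Int → (List String → Nat) → List (Int × Int)
  | [], _, _ => []
  | v :: rest, s, cnt =>
    match (pvOcc new 0 v).drop (cnt v) with
    | [] => pvF new rest (s + 1) cnt
    | h :: _ => (s + 1, h) :: pvF new rest (s + 1) (fun k => if k = v then cnt k + 1 else cnt k)

theorem pvF_first_gt (new : List (List String)) (old' : List (List String)) :
    ∀ (s : Int) (cnt : List String → Nat) (p : Int × Int), p ∈ pvF new old' s cnt → s < p.1 := by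
  induction old' with
  | nil => intro s cnt p hp; simp [pvF] at hp
  | cons x xs ih =>
    intro s cnt p hp
    simp only [pvF] at hp
    cases hd : (pvOcc new 0 x).drop (cnt x) with
    | nil =>
      rw [hd] at hp
      have := ih (s + 1) cnt p hp
      omega
    | cons h t =>
      rw [hd] at hp
      rcases List.mem_cons.mp hp with rfl | hp'
      · simp
      · have := ih (s + 1) _ p hp'
        omega

theorem pvF_pairwise (new : List (List String)) (old' : List (List String)) :
    ∀ (s : Int) (cnt : List String → Nat),
      (pvF new old' s cnt).Pairwise (fun p q => p.1 < q.1) := by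
  induction old' with
  | nil => intro s cnt; simp [pvF]
  | cons x xs ih =>
    intro s cnt
    simp only [pvF]
    cases hd : (pvOcc new 0 x).drop (cnt x) with
    | nil => exact ih (s + 1) cnt
    | cons h t =>
      refine List.Pairwise.cons ?_ (ih (s + 1) _)
      intro q hq
      exact pvF_first_gt new xs (s + 1) _ q hq

theorem pvF_nodup (new : List (List String)) (old' : List (List String)) (s : Int)
    (cnt : List String → Nat) : (pvF new old' s cnt).Nodup :=
  (pvF_pairwise new old' s cnt).imp
    (fun {a b} h => fun e => by rw [e] at h; omega)

-- A's main loop computes pvF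
theorem pvA_loop (new : List (List String)) (vtr : PySem.Dict (List String) (List Int))
    (hvtr : ∀ k, vtr.getD k [] = pvOcc new 0 k)
    (old' : List (List String)) (s : Int) (m : PySem.Dict Int Int)
    (used : PySem.Set Int) (cnt : List String → Nat)
    (hused : ∀ k, (pvOcc new 0 k).filter (fun i => !(PySem.Set.contains used i))
      = (pvOcc new 0 k).drop (cnt k))
    (hm : ∀ j : Int, s < j → m.contains j = false) :
    ((PySem.List.enumerate old' s).foldl
      (fun (st : PySem.Dict Int Int × PySem.Set Int) p =>
        let options := vtr.getD p.2 []
        match options.find? (fun i => !(PySem.Set.contains st.2 i)) with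
        | some i => if i ≠ 0 then (st.1.insert (p.1 + 1) i, PySem.Set.add st.2 i) else st
        | none => st)
      (m, used)).1.items
    = m.items ++ pvF new old' s cnt := by
  induction old' generalizing s m used cnt with
  | nil => simp [PySem.List.enumerate_nil, pvF]
  | cons x xs ih =>
    rw [PySem.List.enumerate_cons, List.foldl_cons]
    simp only [hvtr]
    rw [show ∀ (l : List Int) (p : Int → Bool), l.find? p = (l.filter p).head? from
      fun l p => Eq.symm List.head?_filter]
    rw [hused x]
    simp only [pvF]
    cases hd : (pvOcc new 0 x).drop (cnt x) with
    | nil =>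
      have hrec := ih (s + 1) m used cnt hused (fun j hj => hm j (by omega))
      simp only [hvtr] at hrec
      simpa using hrec
    | cons h t =>
      have hmem : h ∈ pvOcc new 0 x :=
        List.mem_of_mem_drop (by rw [hd]; exact List.mem_cons_self)
      obtain ⟨j, hj, hnewj, hh⟩ := pvOcc_spec new 0 x h hmem
      have hne0 : h ≠ 0 := by omega
      simp only [List.head?_cons]
      rw [if_pos hne0]
      have hins : (m.insert (s + 1) h).items = m.items ++ [(s + 1, h)] :=
        PySem.Dict.items_insert_of_not_contains m h (hm (s + 1) (by omega))
      -- the 'used'/counter invariant survives adding h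
      have hinv : ∀ k, (pvOcc new 0 k).filter
          (fun i => !(PySem.Set.contains (PySem.Set.add used h) i))
          = (pvOcc new 0 k).drop ((fun k => if k = x then cnt k + 1 else cnt k) k) := by
        intro k
        by_cases hk : k = x
        · subst hk
          have hpt : ∀ i : Int, (!PySem.Set.contains (PySem.Set.add used h) i)
              = ((!PySem.Set.contains used i) && !(i == h)) := by
            intro i
            rw [Bool.eq_iff_iff]
            simp [PySem.Set.mem_add]
          have hfk : (pvOcc new 0 k).filter (fun i => !(PySem.Set.contains used i)) = h :: t := by
            rw [hused k, hd]
          have hb : ((fun k' => if k' = k then cnt k' + 1 else cnt k') k) = cnt k + 1 := by simp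
          rw [hb]
          calc (pvOcc new 0 k).filter (fun i => !(PySem.Set.contains (PySem.Set.add used h) i))
              = (pvOcc new 0 k).filter (fun i => (!(PySem.Set.contains used i)) && !(i == h)) := by
                apply List.filter_congr; intro i _; exact hpt i
            _ = t := filter_tail_of_head _ h t (pvOcc_nodup new 0 k) hfk
            _ = (pvOcc new 0 k).drop (cnt k + 1) := by
                have hdd : (pvOcc new 0 k).drop (cnt k + 1)
                    = ((pvOcc new 0 k).drop (cnt k)).drop 1 := by
                  rw [List.drop_drop]
                rw [hdd, hd, List.drop_one, List.tail_cons]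
        · have hih : ∀ i ∈ pvOcc new 0 k, i ≠ h := by
            intro i hi e
            exact hk (pvOcc_inj new k x i hi (e ▸ hmem))
          simp only [if_neg hk]
          rw [← hused k]
          apply List.filter_congr
          intro i hi
          rw [Bool.eq_iff_iff]
          simp [PySem.Set.mem_add, hih i hi]
      have hmref : ∀ j : Int, s + 1 < j → (m.insert (s + 1) h).contains j = false := by
        intro j hj
        rw [PySem.Dict.contains_insert]
        have h1 : (j == (s + 1 : Int)) = false := by simp; omega
        rw [h1, Bool.false_or]
        exact hm j (by omega)
      have hrec := ih (s + 1) (m.insert (s + 1) h) (PySem.Set.add used h)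
        (fun k => if k = x then cnt k + 1 else cnt k) hinv hmref
      simp only [hvtr] at hrec
      rw [hrec, hins]
      simp

-- the flat list of per-value zips B builds before sorting
def pvPairs (old : List (List String)) (new : List (List String)) : List (Int × Int) :=
  (PySem.Set.ofList old).flatMap (fun v => (pvOcc old 0 v).zip (pvOcc new 0 v))

theorem pairwise_fst_zip {r : Int → Int → Prop} :
    ∀ (a b : List Int), a.Pairwise r → (a.zip b).Pairwise (fun p q => r p.1 q.1) := by
  intro a
  induction a with
  | nil => intro b _; simp
  | cons x xs ih =>
    intro b hp
    cases b with
    | nil => simp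
    | cons y ys =>
      rw [List.zip_cons_cons]
      refine List.Pairwise.cons ?_ (ih ys (List.Pairwise.of_cons hp))
      intro q hq
      exact (List.pairwise_cons.mp hp).1 q.1 (List.of_mem_zip hq).1

theorem pvPairs_nodup (old : List (List String)) (new : List (List String)) :
    (pvPairs old new).Nodup := by
  rw [pvPairs, List.flatMap_def, List.nodup_flatten]
  constructor
  · intro l hl
    rw [List.mem_map] at hl
    obtain ⟨v, _, rfl⟩ := hl
    exact (pairwise_fst_zip _ _ (pvOcc_pairwise old 0 v)).imp
      (fun {p q} h => fun e => by rw [e] at h; omega)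
  · refine List.Pairwise.map _ ?_ ((PySem.Set.nodup_ofList old).imp (fun {v w} h => h))
    intro v w hvw p hp hq
    exact hvw (pvOcc_inj old v w p.1 (List.of_mem_zip hp).1 (List.of_mem_zip hq).1)

theorem mem_pvPairs (old : List (List String)) (new : List (List String)) (a b : Int) :
    (a, b) ∈ pvPairs old new ↔ ∃ v, (a, b) ∈ (pvOcc old 0 v).zip (pvOcc new 0 v) := by
  rw [pvPairs, List.mem_flatMap]
  constructor
  · rintro ⟨v, _, hv⟩; exact ⟨v, hv⟩
  · rintro ⟨v, hv⟩
    refine ⟨v, ?_, hv⟩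
    obtain ⟨j, hj, hval, _⟩ := pvOcc_spec old 0 v a (List.of_mem_zip hv).1
    rw [PySem.Set.mem_ofList]
    exact hval ▸ List.getElem_mem hj

theorem mem_pvF (new : List (List String)) (old' : List (List String)) :
    ∀ (s : Int) (cnt : List String → Nat) (a b : Int),
      ((a, b) ∈ pvF new old' s cnt ↔
        ∃ v, (a, b) ∈ (pvOcc old' s v).zip ((pvOcc new 0 v).drop (cnt v))) := by
  induction old' with
  | nil => intro s cnt a b; simp [pvF, pvOcc_nil]
  | cons x xs ih =>
    intro s cnt a b
    simp only [pvF]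
    cases hd : (pvOcc new 0 x).drop (cnt x) with
    | nil =>
      rw [ih (s + 1) cnt a b]
      apply exists_congr
      intro v
      rw [pvOcc_cons]
      by_cases hv : x = v
      · subst hv
        rw [if_pos rfl, hd]
        simp [List.zip_nil_right]
      · rw [if_neg hv, List.nil_append]
    | cons h t =>
      have ht : t = (pvOcc new 0 x).drop (cnt x + 1) := by
        have : (pvOcc new 0 x).drop (cnt x + 1) = ((pvOcc new 0 x).drop (cnt x)).drop 1 := by
          rw [List.drop_drop]
        rw [this, hd, List.drop_one, List.tail_cons]
      constructor
      · intro hp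
        rcases List.mem_cons.mp hp with he | hp'
        · refine ⟨x, ?_⟩
          rw [pvOcc_cons, if_pos rfl, hd, List.singleton_append, List.zip_cons_cons]
          exact he ▸ List.mem_cons_self
        · obtain ⟨v, hv⟩ := (ih (s + 1) _ a b).mp hp'
          refine ⟨v, ?_⟩
          rw [pvOcc_cons]
          by_cases hxv : x = v
          · subst hxv
            rw [if_pos rfl, hd, List.singleton_append, List.zip_cons_cons]
            refine List.mem_cons_of_mem _ ?_
            simpa [ht] using hv
          · have hvx : ¬ v = x := fun e => hxv e.symm
            rw [if_neg hxv, List.nil_append]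
            simpa [hvx] using hv
      · rintro ⟨v, hv⟩
        rw [pvOcc_cons] at hv
        by_cases hxv : x = v
        · subst hxv
          rw [if_pos rfl, hd, List.singleton_append, List.zip_cons_cons] at hv
          rcases List.mem_cons.mp hv with he | hv'
          · exact he ▸ List.mem_cons_self
          · refine List.mem_cons_of_mem _ ((ih (s + 1) _ a b).mpr ⟨x, ?_⟩)
            simpa [ht] using hv'
        · have hvx : ¬ v = x := fun e => hxv e.symm
          rw [if_neg hxv, List.nil_append] at hv
          refine List.mem_cons_of_mem _ ((ih (s + 1) _ a b).mpr ⟨v, ?_⟩)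
          simpa [hvx] using hv

theorem pvF_perm_pvPairs (old : List (List String)) (new : List (List String)) :
    (pvF new old 0 (fun _ => 0)).Perm (pvPairs old new) := by
  apply List.perm_of_nodup_nodup_toFinset_eq (pvF_nodup new old 0 _) (pvPairs_nodup old new)
  apply Finset.ext
  intro p
  obtain ⟨a, b⟩ := p
  rw [List.mem_toFinset, List.mem_toFinset, mem_pvF, mem_pvPairs]
  apply exists_congr
  intro v
  rw [List.drop_zero]

theorem pvSorted_eq (old : List (List String)) (new : List (List String)) :
    PySem.List.sorted (pvPairs old new) (fun p => p.1) false = pvF new old 0 (fun _ => 0) :=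
  PySem.List.sorted_eq_of_perm_of_pairwise_lt _ _ _
    (pvF_perm_pvPairs old new) (pvF_pairwise new old 0 _)

theorem pvEnum_snd (xs : List (List String)) : ∀ s : Int,
    (PySem.List.enumerate xs s).map (fun p => p.2) = xs := by
  induction xs with
  | nil => intro s; simp [PySem.List.enumerate_nil]
  | cons x xs ih => intro s; rw [PySem.List.enumerate_cons]; simp [ih (s + 1)]

theorem pvOldPos_items (old : List (List String)) :
    ((PySem.List.enumerate old 0).foldl
      (fun d p => d.modify p.2 [] (· ++ [p.1 + 1])) PySem.Dict.empty).items
    = (PySem.Set.ofList old).map (fun v => (v, pvOcc old 0 v)) := by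
  have hnd : ((PySem.List.enumerate old 0).foldl
      (fun d p => d.modify p.2 [] (· ++ [p.1 + 1])) PySem.Dict.empty).keys.Nodup :=
    PySem.Dict.nodup_keys_foldl_modify_key (PySem.List.enumerate old 0)
      (fun p : Int × List String => p.2) ([] : List Int)
      (fun _ (p : Int × List String) => (· ++ [p.1 + 1])) PySem.Dict.empty
      (by simp [PySem.Dict.keys_empty])
  have hkeys : ((PySem.List.enumerate old 0).foldl
      (fun d p => d.modify p.2 [] (· ++ [p.1 + 1])) PySem.Dict.empty).keys
      = PySem.Set.ofList old := by
    rw [PySem.Dict.keys_foldl_modify_key (PySem.List.enumerate old 0)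
      (fun p : Int × List String => p.2) ([] : List Int)
      (fun _ (p : Int × List String) => (· ++ [p.1 + 1]))]
    rw [pvEnum_snd]
    rfl
  rw [PySem.Dict.items_eq_map_keys _ hnd [], hkeys]
  apply List.map_congr_left
  intro v _
  rw [pvGroup_getD]

theorem pvB_pairs (old : List (List String)) (new : List (List String)) :
    (((PySem.List.enumerate old 0).foldl
        (fun d p => d.modify p.2 [] (· ++ [p.1 + 1])) PySem.Dict.empty).items).foldl
      (fun acc q => acc ++ q.2.zip
        (((PySem.List.enumerate new 0).foldl
          (fun d p => d.modify p.2 [] (· ++ [p.1 + 1])) PySem.Dict.empty).getD q.1 [])) []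
    = pvPairs old new := by
  rw [PySem.List.foldl_append_eq_flatMap, List.nil_append, pvOldPos_items]
  rw [pvPairs, List.flatMap_def, List.flatMap_def, List.map_map]
  apply congrArg List.flatten
  apply List.map_congr_left
  intro v _
  simp only [Function.comp_apply]
  rw [pvGroup_getD]

theorem pvB_eq (old : List (List String)) (new : List (List String)) :
    build_row_map_py_alt old new = pvF new old 0 (fun _ => 0) := by
  show ((PySem.List.sorted
      ((((PySem.List.enumerate old 0).foldl
          (fun d p => d.modify p.2 [] (· ++ [p.1 + 1])) PySem.Dict.empty).items).foldl
        (fun acc q => acc ++ q.2.zip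
          (((PySem.List.enumerate new 0).foldl
            (fun d p => d.modify p.2 [] (· ++ [p.1 + 1])) PySem.Dict.empty).getD q.1 [])) [])
      (fun p => p.1) false).foldl
      (fun (d : PySem.Dict Int Int) p => d.insert p.1 p.2) PySem.Dict.empty).items
    = pvF new old 0 (fun _ => 0)
  rw [pvB_pairs, pvSorted_eq]
  have hnd : ((pvF new old 0 (fun _ => 0)).map (fun p : Int × Int => p.1)).Nodup :=
    (List.Pairwise.map _ (fun a b (h : a.1 < b.1) => h)
      (pvF_pairwise new old 0 _)).imp (fun {a b} (h : a < b) => Int.ne_of_lt h)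
  rw [PySem.Dict.items_foldl_insert_fresh (l := pvF new old 0 (fun _ => 0))
    (k := fun p : Int × Int => p.1) (v := fun p : Int × Int => p.2) (d := PySem.Dict.empty)
    (fun a _ => by simp) hnd]
  simp [PySem.Dict.empty]

theorem pvA_eq (old : List (List String)) (new : List (List String)) :
    build_row_map_py old new = pvF new old 0 (fun _ => 0) := by
  show ((PySem.List.enumerate old 0).foldl
      (fun (st : PySem.Dict Int Int × PySem.Set Int) p =>
        let options := ((PySem.List.enumerate new 0).foldl
          (fun d p => d.modify p.2 [] (· ++ [p.1 + 1])) PySem.Dict.empty).getD p.2 []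
        match options.find? (fun i => !(PySem.Set.contains st.2 i)) with
        | some i => if i ≠ 0 then (st.1.insert (p.1 + 1) i, PySem.Set.add st.2 i) else st
        | none => st)
      (PySem.Dict.empty, PySem.Set.empty)).1.items
    = pvF new old 0 (fun _ => 0)
  have h0 : ∀ k : List String, (pvOcc new 0 k).filter
      (fun i => !(PySem.Set.contains PySem.Set.empty i)) = (pvOcc new 0 k).drop 0 := by
    intro k
    rw [List.drop_zero]
    apply List.filter_eq_self.mpr
    intro i _
    simp [PySem.Set.empty]
  have hm0 : ∀ j : Int, (0 : Int) < j → (PySem.Dict.empty : PySem.Dict Int Int).contains j = false := by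
    intro j _
    simp
  rw [pvA_loop new _ (fun k => pvGroup_getD new k) old 0 PySem.Dict.empty PySem.Set.empty
    (fun _ => 0) h0 hm0]
  simp [PySem.Dict.empty]

-- ===== VERDICT (by name: the statement is the Claim_ definition above) =====
theorem build_row_map_py_spec : Claim_equal_build_row_map_py := by
  intro old new _
  unfold Spec_build_row_map_py
  rw [pvA_eq, pvB_eq]
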